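-- pv_equiv track=rewrite | github.com/Gusionling/Algorithm | baekjoon/DFS&BFS/7576.py | find_max_positive
-- ===== SOURCE A (Python) =====
-- def find_max_positive(nested_graph):
--     max_val = 0  # 최대값을 저장할 변수 초기화
--     for subgraph in nested_graph:
--         for item in subgraph:
--             #토마토가 모두 익지 않은 경우
--             if item == 0:
--                 return -1
--             elif item > max_val:  # 현재 최대값보다 큰 양수를 찾으면 갱신
--                 max_val = item
--     # 양수가 하나도 없으면 -1을 반환
--     if max_val == 0:
--         return -1
--     return max_val - 1  # 최초에 1부터 시작했으므로, 실제 최대 거리는 최대값 - 1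
-- ===== SOURCE B (Python) =====
-- def find_max_positive(nested_graph):
--     flat = [item for sub in nested_graph for item in sub]
--     if 0 in flat:
--         return -1
--     m = max(flat) if flat else 0
--     return m - 1 if m > 0 else -1
-- ===== Notes on version B (the rewrite author's own statement) =====
-- stated objective: simpler
-- what changed: Replaces A's interleaved early-exit nested loop with running max by three separate passes over a flattened list: a membership test for 0, a plain max, and one final comparison.
import Mathlib
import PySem

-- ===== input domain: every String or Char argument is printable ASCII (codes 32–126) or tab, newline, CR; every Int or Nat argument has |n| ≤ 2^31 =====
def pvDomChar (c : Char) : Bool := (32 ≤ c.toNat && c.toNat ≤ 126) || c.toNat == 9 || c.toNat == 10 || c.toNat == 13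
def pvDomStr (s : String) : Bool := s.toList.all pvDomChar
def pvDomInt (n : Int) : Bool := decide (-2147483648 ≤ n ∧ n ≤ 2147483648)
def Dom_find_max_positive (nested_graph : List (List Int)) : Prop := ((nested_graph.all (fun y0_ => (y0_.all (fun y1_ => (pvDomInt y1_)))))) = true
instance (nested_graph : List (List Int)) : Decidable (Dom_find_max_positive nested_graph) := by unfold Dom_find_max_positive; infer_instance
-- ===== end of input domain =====

-- B replaces A's interleaved early-exit loop by three separate passes over the flattened list (simpler decomposition; same cost).

-- ===== PORT A =====
-- inner loop over one subgraph: none = the 'return -1' on a zero item, some = the updated max_val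
def pvInnerA : List Int → Int → Option Int
  | [], mv => some mv
  | x :: xs, mv =>
      if x == 0 then none
      else pvInnerA xs (if x > mv then x else mv)

def pvGoA : List (List Int) → Int → Int
  | [], mv => if mv == 0 then -1 else mv - 1
  | sub :: rest, mv =>
      match pvInnerA sub mv with
      | none => -1
      | some mv' => pvGoA rest mv'

def find_max_positive (nested_graph : List (List Int)) : Int :=
  pvGoA nested_graph 0

-- ===== PORT B =====
def find_max_positive_alt (nested_graph : List (List Int)) : Int :=
  let flat := nested_graph.flatten
  if flat.contains 0 then -1
  else
    let m : Int := match flat with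
      | [] => 0
      | x :: xs => xs.foldl max x
    if m > 0 then m - 1 else -1

-- ===== PRECONDITION & SPEC =====
def Spec_find_max_positive (nested_graph : List (List Int)) (out : Int) : Prop := out = find_max_positive_alt nested_graph
instance (nested_graph : List (List Int)) (out : Int) : Decidable (Spec_find_max_positive nested_graph out) := by unfold Spec_find_max_positive; infer_instance

-- ===== CLAIM (what is proved, stated in full; the proofs are below) =====
def Claim_equal_find_max_positive : Prop := ∀ (nested_graph : List (List Int)), Dom_find_max_positive nested_graph → Spec_find_max_positive nested_graph (find_max_positive nested_graph)

-- ===== LEMMAS AND PROOFS =====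

-- A's inner update is max
lemma pvInnerA_eq (sub : List Int) (mv : Int) :
    pvInnerA sub mv = if sub.contains 0 then none else some (sub.foldl max mv) := by
  induction sub generalizing mv with
  | nil => simp [pvInnerA]
  | cons x xs ih =>
      by_cases hx : x = 0
      · subst hx; simp [pvInnerA]
      · have hupd : (if x > mv then x else mv) = max mv x := by
          rcases lt_or_ge mv x with h | h
          · simp [h, max_eq_right h.le]
          · simp [not_lt.mpr h, max_eq_left h]
        have hor : (0 = x ∨ 0 ∈ xs) ↔ (0 ∈ xs) := or_iff_right (fun h => hx h.symm)
        simp [pvInnerA, hx, hupd, ih, hor]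

lemma pvGoA_eq (l : List (List Int)) (mv : Int) :
    pvGoA l mv = if (0 ∈ l.flatten) then -1
      else (if l.flatten.foldl max mv = 0 then -1 else l.flatten.foldl max mv - 1) := by
  induction l generalizing mv with
  | nil => simp [pvGoA]
  | cons sub rest ih =>
      by_cases hz : (0 ∈ sub)
      · have hc : sub.contains 0 = true := by simpa using hz
        simp [pvGoA, pvInnerA_eq, List.flatten_cons, List.mem_append, hz]
      · have hc : sub.contains 0 = false := by simpa using hz
        simp [pvGoA, pvInnerA_eq, ih, List.flatten_cons, List.mem_append, hz,
              List.foldl_append]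

lemma foldl_max_pull (a : Int) (l : List Int) (b : Int) :
    l.foldl max (max a b) = max a (l.foldl max b) := by
  induction l generalizing b with
  | nil => simp
  | cons x xs ih => simp [List.foldl, max_assoc, ih]

-- ===== VERDICT (by name: the statement is the Claim_ definition above) =====
theorem find_max_positive_spec : Claim_equal_find_max_positive := by
  intro ng _
  show find_max_positive ng = find_max_positive_alt ng
  unfold find_max_positive find_max_positive_alt
  rw [pvGoA_eq]
  by_cases hz : (0 ∈ ng.flatten)
  · have hc : ng.flatten.contains 0 = true := by simpa using hz
    simp [hz]
  · have hc : ng.flatten.contains 0 = false := by simpa using hz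
    simp only [hz, hc, if_false, Bool.false_eq_true]
    cases hfl : ng.flatten with
    | nil => simp
    | cons x xs =>
        have h0 : (x :: xs).foldl max 0 = max 0 (xs.foldl max x) := by
          have := foldl_max_pull 0 xs x
          simpa [List.foldl] using this
        rw [h0]
        by_cases hpos : xs.foldl max x > 0
        · simp [max_eq_right hpos.le]
          omega
        · have h00 : max 0 (xs.foldl max x) = 0 := max_eq_left (not_lt.mp hpos)
          simp [h00, hpos]
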